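-- pv_equiv track=rewrite | github.com/kevinnbass/TestMaster | organized_codebase/core/security/unified_scanner_core.py | _calculate_risk_distribution
-- ===== SOURCE A (Python) =====
-- from typing import Dict, List, Any, Optional, Set
--
-- def _calculate_risk_distribution(results: Dict[str, Any]) -> Dict[str, int]:
--     """Calculate distribution of findings by risk level"""
--     distribution = {
--         'critical': 0,
--         'high': 0,
--         'medium': 0,
--         'low': 0,
--         'info': 0
--     }
--
--     for vuln in results.get('vulnerabilities', []):
--         level = vuln.get('threat_level', 'medium')
--         if level in distribution:
--             distribution[level] += 1
--
--     return distribution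
-- ===== SOURCE B (Python) =====
-- def _calculate_risk_distribution(results):
--     """Calculate distribution of findings by risk level"""
--     vulns = results.get('vulnerabilities', [])
--     return {level: sum(1 for v in vulns if v.get('threat_level', 'medium') == level)
--             for level in ('critical', 'high', 'medium', 'low', 'info')}
-- ===== Notes on version B (the rewrite author's own statement) =====
-- stated objective: alternative
-- what changed: Replaces A's single stateful pass that conditionally increments a pre-seeded mutable dict with five independent stateless counting scans, one per fixed risk level, assembled directly into the result dict; no shared accumulator and no per-item membership branch remain.
import Mathlib
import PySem

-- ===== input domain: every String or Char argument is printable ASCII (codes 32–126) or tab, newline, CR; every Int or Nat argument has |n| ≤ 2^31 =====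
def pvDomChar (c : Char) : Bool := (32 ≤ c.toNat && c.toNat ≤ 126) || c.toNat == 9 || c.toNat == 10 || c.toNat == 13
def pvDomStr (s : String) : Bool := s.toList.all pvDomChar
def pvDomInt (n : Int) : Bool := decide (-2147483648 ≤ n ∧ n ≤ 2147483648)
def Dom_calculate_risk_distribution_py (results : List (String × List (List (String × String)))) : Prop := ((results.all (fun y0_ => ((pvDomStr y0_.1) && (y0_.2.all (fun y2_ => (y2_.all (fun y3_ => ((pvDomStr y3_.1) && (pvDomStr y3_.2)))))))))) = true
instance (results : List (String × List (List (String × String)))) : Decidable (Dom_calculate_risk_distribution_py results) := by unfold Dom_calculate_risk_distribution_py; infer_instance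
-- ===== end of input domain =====

-- B replaces A's single stateful pass over a pre-seeded mutable dict by five
-- independent stateless counting scans, one per fixed level (objective: alternative).

-- ===== PORT A =====
-- the body of A's for-loop, one step of the accumulation
def stepFnA (d : PySem.Dict String Int) (vuln : List (String × String)) : PySem.Dict String Int :=
  let level := (PySem.Dict.mk vuln).getD "threat_level" "medium"
  if d.contains level then d.modify level 0 (· + 1) else d

def calculate_risk_distribution_py (results : List (String × List (List (String × String)))) : List (String × Int) :=
  let distribution : PySem.Dict String Int :=
    PySem.Dict.ofList [("critical", 0), ("high", 0), ("medium", 0), ("low", 0), ("info", 0)]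
  let final := ((PySem.Dict.mk results).getD "vulnerabilities" []).foldl stepFnA distribution
  final.items

-- ===== PORT B =====
-- sum(1 for v in vulns if v.get('threat_level','medium') == level): a 0/1-sum over vulns
def countLevelB (vulns : List (List (String × String))) (level : String) : Int :=
  (vulns.map (fun v => if (PySem.Dict.mk v).getD "threat_level" "medium" = level then (1 : Int) else 0)).sum

def calculate_risk_distribution_py_alt (results : List (String × List (List (String × String)))) : List (String × Int) :=
  let vulns := (PySem.Dict.mk results).getD "vulnerabilities" []
  ["critical", "high", "medium", "low", "info"].map (fun level => (level, countLevelB vulns level))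

-- ===== PRECONDITION & SPEC =====
def Spec_calculate_risk_distribution_py (results : List (String × List (List (String × String)))) (out : List (String × Int)) : Prop := out = calculate_risk_distribution_py_alt results
instance (results : List (String × List (List (String × String)))) (out : List (String × Int)) : Decidable (Spec_calculate_risk_distribution_py results out) := by unfold Spec_calculate_risk_distribution_py; infer_instance

-- ===== CLAIM (what is proved, stated in full; the proofs are below) =====
def Claim_equal_calculate_risk_distribution_py : Prop := ∀ (results : List (String × List (List (String × String)))), Dom_calculate_risk_distribution_py results → Spec_calculate_risk_distribution_py results (calculate_risk_distribution_py results)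

-- ===== LEMMAS AND PROOFS =====

-- One loop step of A on the seeded five-key dict: the level's own counter is bumped
-- iff the level is one of the five keys; any other level leaves the dict unchanged.
theorem stepA (v : List (String × String)) (c1 c2 c3 c4 c5 : Int) :
    stepFnA (PySem.Dict.mk [("critical", c1), ("high", c2), ("medium", c3), ("low", c4), ("info", c5)]) v
    = PySem.Dict.mk
        [("critical", if (PySem.Dict.mk v).getD "threat_level" "medium" = "critical" then c1 + 1 else c1),
         ("high",     if (PySem.Dict.mk v).getD "threat_level" "medium" = "high"     then c2 + 1 else c2),
         ("medium",   if (PySem.Dict.mk v).getD "threat_level" "medium" = "medium"   then c3 + 1 else c3),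
         ("low",      if (PySem.Dict.mk v).getD "threat_level" "medium" = "low"      then c4 + 1 else c4),
         ("info",     if (PySem.Dict.mk v).getD "threat_level" "medium" = "info"     then c5 + 1 else c5)] := by
  unfold stepFnA
  generalize (PySem.Dict.mk v).getD "threat_level" "medium" = l
  by_cases h1 : l = "critical"
  · subst h1; simp [PySem.Dict.contains, PySem.Dict.modify, PySem.Dict.getD, PySem.Dict.get?, PySem.Dict.insert]
  by_cases h2 : l = "high"
  · subst h2; simp [PySem.Dict.contains, PySem.Dict.modify, PySem.Dict.getD, PySem.Dict.get?, PySem.Dict.insert]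
  by_cases h3 : l = "medium"
  · subst h3; simp [PySem.Dict.contains, PySem.Dict.modify, PySem.Dict.getD, PySem.Dict.get?, PySem.Dict.insert]
  by_cases h4 : l = "low"
  · subst h4; simp [PySem.Dict.contains, PySem.Dict.modify, PySem.Dict.getD, PySem.Dict.get?, PySem.Dict.insert]
  by_cases h5 : l = "info"
  · subst h5; simp [PySem.Dict.contains, PySem.Dict.modify, PySem.Dict.getD, PySem.Dict.get?, PySem.Dict.insert]
  simp [PySem.Dict.contains, Ne.symm h1, Ne.symm h2, Ne.symm h3, Ne.symm h4, Ne.symm h5]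
  exact ⟨h1, h2, h3, h4, h5⟩

-- A's whole loop, with the five seeded counts generalized: it adds to each key
-- B's 0/1-sum for that key — the number of vulnerabilities at that level.
theorem loopA (vulns : List (List (String × String))) (c1 c2 c3 c4 c5 : Int) :
    vulns.foldl stepFnA
      (PySem.Dict.mk [("critical", c1), ("high", c2), ("medium", c3), ("low", c4), ("info", c5)])
    = PySem.Dict.mk
        [("critical", c1 + countLevelB vulns "critical"),
         ("high",     c2 + countLevelB vulns "high"),
         ("medium",   c3 + countLevelB vulns "medium"),
         ("low",      c4 + countLevelB vulns "low"),
         ("info",     c5 + countLevelB vulns "info")] := by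
  induction vulns generalizing c1 c2 c3 c4 c5 with
  | nil => simp [countLevelB]
  | cons v vs ih =>
    rw [List.foldl_cons, stepA, ih]
    simp only [countLevelB, List.map_cons, List.sum_cons, PySem.Dict.mk.injEq]
    generalize (PySem.Dict.mk v).getD "threat_level" "medium" = l
    simp only [List.cons.injEq, Prod.mk.injEq]
    refine ⟨⟨trivial, ?_⟩, ⟨trivial, ?_⟩, ⟨trivial, ?_⟩, ⟨trivial, ?_⟩, ⟨trivial, ?_⟩, trivial⟩ <;>
      split_ifs <;> omega

-- ===== VERDICT (by name: the statement is the Claim_ definition above) =====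
theorem calculate_risk_distribution_py_spec : Claim_equal_calculate_risk_distribution_py := by
  intro results _
  unfold Spec_calculate_risk_distribution_py
  simp only [calculate_risk_distribution_py, calculate_risk_distribution_py_alt]
  rw [show PySem.Dict.ofList [("critical", (0:Int)), ("high", 0), ("medium", 0), ("low", 0), ("info", 0)]
      = PySem.Dict.mk [("critical", 0), ("high", 0), ("medium", 0), ("low", 0), ("info", 0)] from rfl,
    loopA]
  simp [List.map]
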